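-- pv_equiv track=rewrite | github.com/GKakuuu/Auxiliatura_SIS110_G1_Gestion1_25 | 0_EXTRAS/Solucionarios/P_3/Eje_07.py | puntaje_evento
-- ===== SOURCE A (Python) =====
-- def puntaje_evento(evento):
--     evento = evento.lower()
--     mitad1 = set('abcdefghijklm')
--     mitad2 = set('nopqrstuvwxyz')
--     puntos = 0
--     for letra in evento:
--         if letra in mitad1:
--             puntos += 1
--         elif letra in mitad2:
--             puntos += 2
--     return puntos
-- ===== SOURCE B (Python) =====
-- def puntaje_evento(evento):
--     evento = evento.lower()
--     letras = set('abcdefghijklmnopqrstuvwxyz')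
--     mitad2 = set('nopqrstuvwxyz')
--     return sum(1 for c in evento if c in letras) + sum(1 for c in evento if c in mitad2)
-- ===== Notes on version B (the rewrite author's own statement) =====
-- stated objective: alternative
-- what changed: Replaces the single branching accumulator loop (1 point for a-m, 2 for n-z) by two counting passes: count all letters a-z plus count second-half letters n-z, and add the two counts.
import Mathlib
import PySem

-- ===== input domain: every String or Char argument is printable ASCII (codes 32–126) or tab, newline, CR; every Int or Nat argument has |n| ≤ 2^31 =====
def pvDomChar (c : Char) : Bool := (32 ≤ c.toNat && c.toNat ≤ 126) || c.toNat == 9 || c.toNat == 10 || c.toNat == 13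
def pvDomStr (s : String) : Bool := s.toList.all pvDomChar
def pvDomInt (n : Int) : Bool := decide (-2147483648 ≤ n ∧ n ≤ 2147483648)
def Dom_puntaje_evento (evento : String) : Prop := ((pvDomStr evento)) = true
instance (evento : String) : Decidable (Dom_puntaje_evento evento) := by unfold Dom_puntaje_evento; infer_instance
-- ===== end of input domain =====

-- B changes the decomposition: instead of A's single loop branching 1-or-2 points, it counts all letters a-z
-- plus counts second-half letters n-z and adds the two counts (same O(n) cost, different structure).

-- ===== PORT A =====
def puntaje_evento (evento : String) : Int :=
  let ev := (PySem.Str.lower evento).toList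
  let mitad1 : PySem.Set Char := PySem.Set.ofList "abcdefghijklm".toList
  let mitad2 : PySem.Set Char := PySem.Set.ofList "nopqrstuvwxyz".toList
  ev.foldl (fun puntos letra =>
    if mitad1.contains letra then puntos + 1
    else if mitad2.contains letra then puntos + 2
    else puntos) 0

-- ===== PORT B =====
def puntaje_evento_alt (evento : String) : Int :=
  let ev := (PySem.Str.lower evento).toList
  let letras : PySem.Set Char := PySem.Set.ofList "abcdefghijklmnopqrstuvwxyz".toList
  let mitad2 : PySem.Set Char := PySem.Set.ofList "nopqrstuvwxyz".toList
  ((ev.countP (fun c => letras.contains c) : Nat) : Int)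
    + ((ev.countP (fun c => mitad2.contains c) : Nat) : Int)

-- ===== PRECONDITION & SPEC =====
def Spec_puntaje_evento (evento : String) (out : Int) : Prop := out = puntaje_evento_alt evento
instance (evento : String) (out : Int) : Decidable (Spec_puntaje_evento evento out) := by unfold Spec_puntaje_evento; infer_instance

-- ===== CLAIM (what is proved, stated in full; the proofs are below) =====
def Claim_equal_puntaje_evento : Prop := ∀ (evento : String), Dom_puntaje_evento evento → Spec_puntaje_evento evento (puntaje_evento evento)

-- ===== LEMMAS AND PROOFS =====

-- per-character value of A's branch, expressed as B's two 0/1 contributions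
set_option maxRecDepth 4000 in
theorem pv_step_char (c : Char) (acc : Int) :
    (if (PySem.Set.ofList "abcdefghijklm".toList).contains c then acc + 1
     else if (PySem.Set.ofList "nopqrstuvwxyz".toList).contains c then acc + 2
     else acc)
    = acc + (if (PySem.Set.ofList "abcdefghijklmnopqrstuvwxyz".toList).contains c then (1:Int) else 0)
          + (if (PySem.Set.ofList "nopqrstuvwxyz".toList).contains c then (1:Int) else 0) := by
  have happ : (PySem.Set.ofList "abcdefghijklmnopqrstuvwxyz".toList : List Char)
      = (PySem.Set.ofList "abcdefghijklm".toList : List Char)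
        ++ (PySem.Set.ofList "nopqrstuvwxyz".toList : List Char) := by decide
  simp only [PySem.Set.contains]
  rw [happ]
  simp only [List.contains_append]
  cases h1 : List.contains (PySem.Set.ofList "abcdefghijklm".toList) c with
  | true =>
    have hm1 : c ∈ (PySem.Set.ofList "abcdefghijklm".toList : List Char) :=
      List.contains_iff_mem.mp h1
    have h2 : List.contains (PySem.Set.ofList "nopqrstuvwxyz".toList) c = false := by
      simp at hm1
      rcases hm1 with rfl|rfl|rfl|rfl|rfl|rfl|rfl|rfl|rfl|rfl|rfl|rfl|rfl <;> decide
    simp only [h2, Bool.true_or]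
    norm_num
  | false =>
    rcases Bool.eq_false_or_eq_true
        (List.contains (PySem.Set.ofList "nopqrstuvwxyz".toList) c) with h2 | h2 <;>
      simp only [h2, Bool.false_or] <;> (norm_num; try omega)

-- A's fold equals the sum of B's two counts, for any accumulator
theorem pv_fold_eq (cs : List Char) (acc : Int) :
    cs.foldl (fun puntos letra =>
      if (PySem.Set.ofList "abcdefghijklm".toList).contains letra then puntos + 1
      else if (PySem.Set.ofList "nopqrstuvwxyz".toList).contains letra then puntos + 2
      else puntos) acc
    = acc + ((cs.countP (fun c => (PySem.Set.ofList "abcdefghijklmnopqrstuvwxyz".toList).contains c) : Nat) : Int)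
          + ((cs.countP (fun c => (PySem.Set.ofList "nopqrstuvwxyz".toList).contains c) : Nat) : Int) := by
  induction cs generalizing acc with
  | nil => simp
  | cons c cs ih =>
    simp only [List.foldl_cons, List.countP_cons]
    rw [ih, pv_step_char c acc]
    split_ifs <;> push_cast <;> omega

-- ===== VERDICT (by name: the statement is the Claim_ definition above) =====
theorem puntaje_evento_spec : Claim_equal_puntaje_evento := by
  intro evento _
  show puntaje_evento evento = puntaje_evento_alt evento
  simp only [puntaje_evento, puntaje_evento_alt]
  rw [pv_fold_eq]
  push_cast
  ring
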